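-- pv_equiv track=rewrite | github.com/benjaminh/ANA | useful.py | count_nuc_cases
-- ===== SOURCE A (Python) =====
-- def count_nuc_cases(value_eq):# merged = list of tuples(link_word_type, cand_id) for equivalent twords
-- #{merged[tuple of (occurrence_position)]: list of tuples(cand_id, link_word_type)}
-- # Four Cases!
--     s1 = 0# s1: same linkword same CAND
--     s2 = 0# s2: same linkword, different CAND
--     s3 = 0# s3: different linkword, same CAND
--     s4 = 0# s4: different linkword, different CAND
--     seen = set()
--     for i, feature in enumerate(value_eq):#feature is tuple(cand_id, link_word_type)
--         link_word_type, cand_id = feature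
--         seen.add(i)
--         for i2, feature2 in enumerate(value_eq):
--             if i2 not in seen:
--                 link_word_type2, cand_id2 = feature2
--                 if cand_id2 != cand_id and link_word_type2 == link_word_type:
--                     s2 += 1
--                 elif cand_id2 == cand_id and link_word_type2 == link_word_type:
--                     s1 += 1
--                 elif cand_id2 == cand_id and link_word_type2 != link_word_type:
--                     s3 += 1
--                 elif cand_id2 != cand_id and link_word_type2 != link_word_type:
--                     s4 += 1
--     return (s1, s2, s3, s4)
-- ===== SOURCE B (Python) =====
-- def count_nuc_cases(value_eq):
--     # One pass: for each feature, count how the earlier features relate to it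
--     # using running frequency tables, instead of scanning all later pairs.
--     s1 = 0
--     s2 = 0
--     s3 = 0
--     s4 = 0
--     tup_count = {}
--     link_count = {}
--     cand_count = {}
--     k = 0
--     for link_word_type, cand_id in value_eq:
--         t = tup_count.get((link_word_type, cand_id), 0)
--         l = link_count.get(link_word_type, 0)
--         c = cand_count.get(cand_id, 0)
--         s1 += t
--         s2 += l - t
--         s3 += c - t
--         s4 += k - l - c + t
--         tup_count[(link_word_type, cand_id)] = t + 1
--         link_count[link_word_type] = l + 1
--         cand_count[cand_id] = c + 1
--         k += 1
--     return (s1, s2, s3, s4)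
-- ===== Notes on version B (the rewrite author's own statement) =====
-- stated objective: faster
-- what changed: replaced the nested scan over all later pairs by a single pass that classifies each feature against running frequency tables (full tuple, link word type, cand id) of the earlier features
import Mathlib
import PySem

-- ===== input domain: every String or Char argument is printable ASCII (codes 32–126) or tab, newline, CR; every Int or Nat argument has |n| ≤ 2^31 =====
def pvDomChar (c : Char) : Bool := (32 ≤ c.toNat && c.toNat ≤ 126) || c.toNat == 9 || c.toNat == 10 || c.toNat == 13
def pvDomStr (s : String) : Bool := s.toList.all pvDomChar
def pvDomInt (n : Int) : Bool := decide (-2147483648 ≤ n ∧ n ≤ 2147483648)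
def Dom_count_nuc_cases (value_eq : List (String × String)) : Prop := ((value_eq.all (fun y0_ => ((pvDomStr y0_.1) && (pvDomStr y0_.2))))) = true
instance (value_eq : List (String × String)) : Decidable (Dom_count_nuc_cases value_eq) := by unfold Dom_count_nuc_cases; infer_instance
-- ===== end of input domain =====

-- B replaces A's nested scan over all later pairs by one pass that classifies each
-- feature against running frequency dicts of the earlier features (objective: faster).


-- ===== PORT A =====
-- inner loop body: 'for i2, feature2 in enumerate(value_eq): if i2 not in seen: …'
def pvInnerStepA (link_word_type cand_id : String) (seen : PySem.Set Int)
    (s : Int × Int × Int × Int) (q : Int × (String × String)) : Int × Int × Int × Int :=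
  if ¬ PySem.Set.contains seen q.1 then
    let link_word_type2 := q.2.1
    let cand_id2 := q.2.2
    if cand_id2 ≠ cand_id ∧ link_word_type2 = link_word_type then (s.1, s.2.1 + 1, s.2.2.1, s.2.2.2)
    else if cand_id2 = cand_id ∧ link_word_type2 = link_word_type then (s.1 + 1, s.2.1, s.2.2.1, s.2.2.2)
    else if cand_id2 = cand_id ∧ link_word_type2 ≠ link_word_type then (s.1, s.2.1, s.2.2.1 + 1, s.2.2.2)
    else if cand_id2 ≠ cand_id ∧ link_word_type2 ≠ link_word_type then (s.1, s.2.1, s.2.2.1, s.2.2.2 + 1)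
    else s
  else s

-- outer loop body: 'for i, feature in enumerate(value_eq): … seen.add(i); <inner loop>'
def pvOuterStepA (value_eq : List (String × String))
    (acc : (Int × Int × Int × Int) × PySem.Set Int) (p : Int × (String × String)) :
    (Int × Int × Int × Int) × PySem.Set Int :=
  let link_word_type := p.2.1
  let cand_id := p.2.2
  let seen := PySem.Set.add acc.2 p.1
  ((PySem.List.enumerate value_eq 0).foldl (pvInnerStepA link_word_type cand_id seen) acc.1, seen)

def count_nuc_cases (value_eq : List (String × String)) : Int × Int × Int × Int :=
  ((PySem.List.enumerate value_eq 0).foldl (pvOuterStepA value_eq)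
    ((0, 0, 0, 0), PySem.Set.empty)).1

-- ===== PORT B =====
-- loop body of Source B: classify the new feature against the running frequency dicts, then bump them
def pvStepB (acc : (Int × Int × Int × Int) × PySem.Dict (String × String) Int × PySem.Dict String Int × PySem.Dict String Int × Int)
    (f : String × String) :
    (Int × Int × Int × Int) × PySem.Dict (String × String) Int × PySem.Dict String Int × PySem.Dict String Int × Int :=
  let link_word_type := f.1
  let cand_id := f.2
  let s := acc.1
  let tup_count := acc.2.1
  let link_count := acc.2.2.1
  let cand_count := acc.2.2.2.1
  let k := acc.2.2.2.2
  let t := tup_count.getD (link_word_type, cand_id) 0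
  let l := link_count.getD link_word_type 0
  let c := cand_count.getD cand_id 0
  ((s.1 + t, s.2.1 + (l - t), s.2.2.1 + (c - t), s.2.2.2 + (k - l - c + t)),
   tup_count.insert (link_word_type, cand_id) (t + 1),
   link_count.insert link_word_type (l + 1),
   cand_count.insert cand_id (c + 1),
   k + 1)

def count_nuc_cases_alt (value_eq : List (String × String)) : Int × Int × Int × Int :=
  (value_eq.foldl pvStepB
    ((0, 0, 0, 0), PySem.Dict.empty, PySem.Dict.empty, PySem.Dict.empty, 0)).1

-- ===== PRECONDITION & SPEC =====
def Spec_count_nuc_cases (value_eq : List (String × String)) (out : Int × Int × Int × Int) : Prop := out = count_nuc_cases_alt value_eq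
instance (value_eq : List (String × String)) (out : Int × Int × Int × Int) : Decidable (Spec_count_nuc_cases value_eq out) := by unfold Spec_count_nuc_cases; infer_instance

-- ===== CLAIM (what is proved, stated in full; the proofs are below) =====
def Claim_equal_count_nuc_cases : Prop := ∀ (value_eq : List (String × String)), Dom_count_nuc_cases value_eq → Spec_count_nuc_cases value_eq (count_nuc_cases value_eq)

-- ===== LEMMAS AND PROOFS =====

-- componentwise addition of the four counters
def pvAdd4 (a b : Int × Int × Int × Int) : Int × Int × Int × Int :=
  (a.1 + b.1, a.2.1 + b.2.1, a.2.2.1 + b.2.2.1, a.2.2.2 + b.2.2.2)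

-- classification of the ordered pair (x earlier, y later), exactly A's branch order
def pvCls (x y : String × String) : Int × Int × Int × Int :=
  if y.2 ≠ x.2 ∧ y.1 = x.1 then (0, 1, 0, 0)
  else if y.2 = x.2 ∧ y.1 = x.1 then (1, 0, 0, 0)
  else if y.2 = x.2 ∧ y.1 ≠ x.1 then (0, 0, 1, 0)
  else (0, 0, 0, 1)

-- sum of pvCls x y over the later features y
def pvTally (x : String × String) : List (String × String) → Int × Int × Int × Int
  | [] => (0, 0, 0, 0)
  | y :: r => pvAdd4 (pvCls x y) (pvTally x r)

-- sum of pvCls y x over the earlier features y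
def pvTallyRev (x : String × String) : List (String × String) → Int × Int × Int × Int
  | [] => (0, 0, 0, 0)
  | y :: r => pvAdd4 (pvCls y x) (pvTallyRev x r)

-- A-shaped pair sum: each element against its suffix
def pvP : List (String × String) → Int × Int × Int × Int
  | [] => (0, 0, 0, 0)
  | x :: r => pvAdd4 (pvTally x r) (pvP r)

-- B-shaped pair sum: each element against its prefix
def pvPf : List (String × String) → List (String × String) → Int × Int × Int × Int
  | _, [] => (0, 0, 0, 0)
  | p, x :: r => pvAdd4 (pvTallyRev x p) (pvPf (p ++ [x]) r)

-- sum of pvTallyRev over a list of later features against one common prefix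
def pvSTR : List (String × String) → List (String × String) → Int × Int × Int × Int
  | [], _ => (0, 0, 0, 0)
  | y :: r, p => pvAdd4 (pvTallyRev y p) (pvSTR r p)

lemma pvAdd4_zero_left (b : Int × Int × Int × Int) : pvAdd4 (0, 0, 0, 0) b = b := by
  obtain ⟨b1, b2, b3, b4⟩ := b; simp [pvAdd4]

lemma pvAdd4_zero_right (a : Int × Int × Int × Int) : pvAdd4 a (0, 0, 0, 0) = a := by
  obtain ⟨a1, a2, a3, a4⟩ := a; simp [pvAdd4]

lemma pvAdd4_assoc (a b c : Int × Int × Int × Int) :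
    pvAdd4 (pvAdd4 a b) c = pvAdd4 a (pvAdd4 b c) := by
  simp only [pvAdd4, Prod.mk.injEq]; omega

-- tallyRev distributes over the prefix growing on the right
lemma pvTallyRev_append (x : String × String) (p q : List (String × String)) :
    pvTallyRev x (p ++ q) = pvAdd4 (pvTallyRev x p) (pvTallyRev x q) := by
  induction p with
  | nil => simp [pvTallyRev, pvAdd4_zero_left]
  | cons y r ih => simp [pvTallyRev, ih, pvAdd4_assoc]

lemma pvTallyRev_singleton (x y : String × String) :
    pvTallyRev y [x] = pvAdd4 (pvCls x y) (0, 0, 0, 0) := rfl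

lemma pvSTR_append_singleton (r p : List (String × String)) (x : String × String) :
    pvSTR r (p ++ [x]) = pvAdd4 (pvSTR r p) (pvTally x r) := by
  induction r with
  | nil => simp [pvSTR, pvTally, pvAdd4]
  | cons y s ih =>
    simp only [pvSTR, pvTally, ih, pvTallyRev_append, pvTallyRev_singleton]
    simp only [pvAdd4, Prod.mk.injEq]; omega

-- bridge between the suffix-shaped and prefix-shaped pair sums
lemma pvPf_eq (suf : List (String × String)) :
    ∀ p, pvPf p suf = pvAdd4 (pvP suf) (pvSTR suf p) := by
  induction suf with
  | nil => intro p; simp [pvPf, pvP, pvSTR, pvAdd4]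
  | cons x r ih =>
    intro p
    simp only [pvPf, pvP, pvSTR, ih, pvSTR_append_singleton]
    simp only [pvAdd4, Prod.mk.injEq]; omega

lemma pvSTR_nil_prefix (r : List (String × String)) : pvSTR r [] = (0, 0, 0, 0) := by
  induction r with
  | nil => rfl
  | cons y s ih => simp [pvSTR, pvTallyRev, ih, pvAdd4]

lemma pvPf_nil : ∀ xs, pvPf [] xs = pvP xs := by
  intro xs; rw [pvPf_eq, pvSTR_nil_prefix, pvAdd4_zero_right]

-- ---- A-side ----

lemma pv_contains_pyRange_true (bound i : Int) (h : 0 ≤ i ∧ i < bound) :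
    PySem.Set.contains (PySem.List.pyRange 0 bound 1) i = true := by
  rw [PySem.Set.contains_iff, PySem.List.mem_pyRange_one]; omega

lemma pv_contains_pyRange_false (bound i : Int) (h : bound ≤ i ∨ i < 0) :
    PySem.Set.contains (PySem.List.pyRange 0 bound 1) i = false := by
  rw [Bool.eq_false_iff]
  intro hc
  rw [PySem.Set.contains_iff, PySem.List.mem_pyRange_one] at hc
  omega

lemma pvInnerStepA_skip (lw cd : String) (seen : PySem.Set Int) (s : Int × Int × Int × Int)
    (q : Int × (String × String)) (h : PySem.Set.contains seen q.1 = true) :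
    pvInnerStepA lw cd seen s q = s := by
  unfold pvInnerStepA
  rw [h]
  simp

lemma pvInnerStepA_count (lw cd : String) (seen : PySem.Set Int) (s : Int × Int × Int × Int)
    (q : Int × (String × String)) (h : PySem.Set.contains seen q.1 = false) :
    pvInnerStepA lw cd seen s q = pvAdd4 s (pvCls (lw, cd) q.2) := by
  obtain ⟨s1, s2, s3, s4⟩ := s
  simp only [pvInnerStepA, pvCls, h, Bool.false_eq_true, not_false_eq_true, if_true]
  split_ifs <;> simp_all [pvAdd4]

lemma pvInner_skip (lw cd : String) (bound : Int) (l : List (String × String)) :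
    ∀ (s : Int) (acc : Int × Int × Int × Int), 0 ≤ s → s + l.length ≤ bound →
    (PySem.List.enumerate l s).foldl (pvInnerStepA lw cd (PySem.List.pyRange 0 bound 1)) acc = acc := by
  induction l with
  | nil => intro s acc _ _; simp [PySem.List.enumerate_nil]
  | cons y r ih =>
    intro s acc hs hb
    rw [PySem.List.enumerate_cons]
    simp only [List.foldl_cons]
    rw [pvInnerStepA_skip _ _ _ _ _ (pv_contains_pyRange_true bound s (by simp at hb ⊢; omega))]
    exact ih (s + 1) acc (by omega) (by simp at hb ⊢; omega)

lemma pvInner_count (lw cd : String) (bound : Int) (l : List (String × String)) :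
    ∀ (s : Int) (acc : Int × Int × Int × Int), bound ≤ s →
    (PySem.List.enumerate l s).foldl (pvInnerStepA lw cd (PySem.List.pyRange 0 bound 1)) acc
      = pvAdd4 acc (pvTally (lw, cd) l) := by
  induction l with
  | nil => intro s acc _; simp [PySem.List.enumerate_nil, pvTally, pvAdd4_zero_right]
  | cons y r ih =>
    intro s acc hb
    rw [PySem.List.enumerate_cons]
    simp only [List.foldl_cons]
    rw [pvInnerStepA_count _ _ _ _ _ (pv_contains_pyRange_false bound s (by omega))]
    rw [ih (s + 1) _ (by omega)]
    simp only [pvTally, pvAdd4_assoc]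

lemma pv_seen_add (m : Nat) :
    PySem.Set.add (PySem.List.pyRange 0 (m : Int) 1) (m : Int)
      = PySem.List.pyRange 0 ((m : Int) + 1) 1 := by
  have hnc : PySem.Set.contains (PySem.List.pyRange 0 (m : Int) 1) (m : Int) = false :=
    pv_contains_pyRange_false _ _ (by omega)
  rw [PySem.Set.add, hnc]
  simp only [Bool.false_eq_true, if_false]
  exact (PySem.List.pyRange_one_succ_right (a := 0) (b := (m : Int)) (by omega)).symm

lemma pvOuterA (xs : List (String × String)) :
    ∀ (suf : List (String × String)) (m : Nat) (acc : Int × Int × Int × Int),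
    List.drop m xs = suf →
    (PySem.List.enumerate suf (m : Int)).foldl (pvOuterStepA xs) (acc, PySem.List.pyRange 0 (m : Int) 1)
      = (pvAdd4 acc (pvP suf), PySem.List.pyRange 0 ((m + suf.length : Nat) : Int) 1) := by
  intro suf
  induction suf with
  | nil => intro m acc _; simp [PySem.List.enumerate_nil, pvP, pvAdd4_zero_right]
  | cons x r ih =>
    intro m acc hdrop
    have hm : m < xs.length := by
      by_contra h
      rw [List.drop_eq_nil_of_le (by omega)] at hdrop
      simp at hdrop
    have hdrop' : List.drop (m + 1) xs = r := by
      rw [← List.drop_drop]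
      rw [hdrop]
      rfl
    rw [PySem.List.enumerate_cons]
    simp only [List.foldl_cons]
    have hstep : pvOuterStepA xs (acc, PySem.List.pyRange 0 (m : Int) 1) ((m : Int), x)
        = (pvAdd4 acc (pvTally x r), PySem.List.pyRange 0 ((m : Int) + 1) 1) := by
      show ((PySem.List.enumerate xs 0).foldl
          (pvInnerStepA x.1 x.2 (PySem.Set.add (PySem.List.pyRange 0 (m : Int) 1) (m : Int))) acc,
          PySem.Set.add (PySem.List.pyRange 0 (m : Int) 1) (m : Int))
        = (pvAdd4 acc (pvTally x r), PySem.List.pyRange 0 ((m : Int) + 1) 1)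
      rw [pv_seen_add]
      refine Prod.ext ?_ rfl
      have hsplit : xs = List.take (m + 1) xs ++ List.drop (m + 1) xs := (List.take_append_drop _ _).symm
      have hlen : (List.take (m + 1) xs).length = m + 1 := by
        rw [List.length_take]; omega
      conv_lhs => rw [hsplit]
      rw [PySem.List.enumerate_append, List.foldl_append, hlen]
      rw [pvInner_skip x.1 x.2 ((m : Int) + 1) _ 0 acc (by omega) (by rw [hlen]; push_cast; omega)]
      rw [hdrop']
      rw [pvInner_count x.1 x.2 ((m : Int) + 1) r ((0 : Int) + ((m + 1 : Nat) : Int)) acc (by push_cast; omega)]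
    rw [hstep]
    have hc : ((m : Int) + 1) = ((m + 1 : Nat) : Int) := by push_cast; ring
    rw [hc, ih (m + 1) _ hdrop']
    simp only [pvP]
    rw [pvAdd4_assoc]
    have hn : m + 1 + r.length = m + (x :: r).length := by
      simp only [List.length_cons]; omega
    rw [hn]

lemma pvA_eq_pvP (xs : List (String × String)) : count_nuc_cases xs = pvP xs := by
  unfold count_nuc_cases
  have h := pvOuterA xs xs 0 (0, 0, 0, 0) rfl
  simp only [Nat.cast_zero] at h
  rw [show (PySem.Set.empty : PySem.Set Int) = PySem.List.pyRange 0 (0 : Int) 1 by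
        rw [PySem.List.pyRange_one_eq_nil (by omega)]; rfl]
  rw [h, pvAdd4_zero_left]

-- ---- B-side ----

lemma pvTallyRev_counts (lw cd : String) (pre : List (String × String)) :
    pvTallyRev (lw, cd) pre =
      ((pre.count (lw, cd) : Int),
       ((pre.map Prod.fst).count lw : Int) - (pre.count (lw, cd) : Int),
       ((pre.map Prod.snd).count cd : Int) - (pre.count (lw, cd) : Int),
       (pre.length : Int) - ((pre.map Prod.fst).count lw : Int) - ((pre.map Prod.snd).count cd : Int) + (pre.count (lw, cd) : Int)) := by
  induction pre with
  | nil => simp [pvTallyRev]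
  | cons y r ih =>
    obtain ⟨yl, yc⟩ := y
    by_cases h1 : lw = yl <;> by_cases h2 : cd = yc
    · subst h1; subst h2
      simp [pvTallyRev, pvCls, ih, pvAdd4, Prod.ext_iff]
      omega
    · subst h1
      simp [pvTallyRev, pvCls, ih, pvAdd4, h2, Ne.symm h2, Prod.ext_iff]
      omega
    · subst h2
      simp [pvTallyRev, pvCls, ih, pvAdd4, h1, Ne.symm h1, Prod.ext_iff]
      omega
    · simp [pvTallyRev, pvCls, ih, pvAdd4, h1, h2, Ne.symm h1, Ne.symm h2, Prod.ext_iff]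
      omega

lemma pvFoldB (suf : List (String × String)) :
    ∀ (pre : List (String × String)) (acc : Int × Int × Int × Int)
      (tup : PySem.Dict (String × String) Int) (link cand : PySem.Dict String Int),
    (∀ key, tup.getD key 0 = (pre.count key : Int)) →
    (∀ w, link.getD w 0 = ((pre.map Prod.fst).count w : Int)) →
    (∀ w, cand.getD w 0 = ((pre.map Prod.snd).count w : Int)) →
    (suf.foldl pvStepB (acc, tup, link, cand, (pre.length : Int))).1
      = pvAdd4 acc (pvPf pre suf) := by
  induction suf with
  | nil => intro pre acc tup link cand _ _ _; simp [pvPf, pvAdd4_zero_right]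
  | cons x r ih =>
    obtain ⟨xl, xc⟩ := x
    intro pre acc tup link cand htup hlink hcand
    simp only [List.foldl_cons]
    have hstep : pvStepB (acc, tup, link, cand, (pre.length : Int)) (xl, xc)
        = (pvAdd4 acc (pvTallyRev (xl, xc) pre),
           tup.insert (xl, xc) (tup.getD (xl, xc) 0 + 1),
           link.insert xl (link.getD xl 0 + 1),
           cand.insert xc (cand.getD xc 0 + 1),
           (pre.length : Int) + 1) := by
      obtain ⟨a1, a2, a3, a4⟩ := acc
      simp [pvStepB, pvAdd4, htup, hlink, hcand, pvTallyRev_counts]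
    rw [hstep]
    have hlen2 : (pre.length : Int) + 1 = (((pre ++ [(xl, xc)]).length : Nat) : Int) := by
      simp only [List.length_append, List.length_cons, List.length_nil]; push_cast; ring
    rw [hlen2]
    have ht : ∀ key, (tup.insert (xl, xc) (tup.getD (xl, xc) 0 + 1)).getD key 0
        = (((pre ++ [(xl, xc)]).count key : Nat) : Int) := by
      intro key
      rw [PySem.Dict.getD_insert, List.count_append]
      by_cases hk : key = (xl, xc)
      · subst hk
        rw [if_pos rfl, htup]
        simp
      · rw [if_neg hk, htup key]
        have hb : ((xl, xc) == key) = false := by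
          rw [beq_eq_false_iff_ne]
          exact fun h => hk h.symm
        simp [List.count_cons, hb]
    have hl : ∀ w, (link.insert xl (link.getD xl 0 + 1)).getD w 0
        = ((((pre ++ [(xl, xc)]).map Prod.fst).count w : Nat) : Int) := by
      intro w
      rw [PySem.Dict.getD_insert]
      simp only [List.map_append, List.map_cons, List.map_nil, List.count_append]
      by_cases hw : w = xl
      · subst hw
        rw [if_pos rfl, hlink]
        simp
      · rw [if_neg hw, hlink w]
        have hb : (xl == w) = false := by
          rw [beq_eq_false_iff_ne]
          exact fun h => hw h.symm
        simp [List.count_cons, hb]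
    have hc : ∀ w, (cand.insert xc (cand.getD xc 0 + 1)).getD w 0
        = ((((pre ++ [(xl, xc)]).map Prod.snd).count w : Nat) : Int) := by
      intro w
      rw [PySem.Dict.getD_insert]
      simp only [List.map_append, List.map_cons, List.map_nil, List.count_append]
      by_cases hw : w = xc
      · subst hw
        rw [if_pos rfl, hcand]
        simp
      · rw [if_neg hw, hcand w]
        have hb : (xc == w) = false := by
          rw [beq_eq_false_iff_ne]
          exact fun h => hw h.symm
        simp [List.count_cons, hb]
    rw [ih (pre ++ [(xl, xc)]) _ _ _ _ ht hl hc]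
    simp only [pvPf, pvAdd4_assoc]

lemma pvB_eq_pvPf (xs : List (String × String)) : count_nuc_cases_alt xs = pvPf [] xs := by
  unfold count_nuc_cases_alt
  have h := pvFoldB xs [] (0, 0, 0, 0) PySem.Dict.empty PySem.Dict.empty PySem.Dict.empty
    (by intro key; simp [PySem.Dict.getD_empty])
    (by intro w; simp [PySem.Dict.getD_empty])
    (by intro w; simp [PySem.Dict.getD_empty])
  simp only [List.length_nil, Nat.cast_zero] at h
  rw [h, pvAdd4_zero_left]

-- ===== VERDICT (by name: the statement is the Claim_ definition above) =====
theorem count_nuc_cases_spec : Claim_equal_count_nuc_cases := by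
  intro xs _
  show count_nuc_cases xs = count_nuc_cases_alt xs
  rw [pvA_eq_pvP, pvB_eq_pvPf, pvPf_nil]
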